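-- pv_equiv track=rewrite | github.com/farocardician/simplitx | services/pdf2json/stages/s06_line_items_from_cellsV2.py | _family_from_header_text
-- ===== SOURCE A (Python) =====
-- from typing import Any, Dict, List, Optional
--
-- def _canon(s: str) -> str:
--     return "".join(ch for ch in (s or "").upper() if ch.isalnum())
--
-- def _family_from_header_text(text: str, header_aliases: Dict[str,List[str]]) -> Optional[str]:
--     c = _canon(text)
--     if not c: return None
--     best = None; best_len = 0
--     for fam, arr in (header_aliases or {}).items():
--         fam_up = fam.upper()
--         for alias in (arr or []):
--             p = _canon(alias)
--             if p and p in c and len(p) > best_len: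
--                 best, best_len = fam_up, len(p)
--     return best
-- ===== SOURCE B (Python) =====
-- from typing import Dict, List, Optional
--
-- def _canon(s: str) -> str:
--     return "".join(ch for ch in (s or "").upper() if ch.isalnum())
--
-- def _family_from_header_text(text: str, header_aliases: Dict[str, List[str]]) -> Optional[str]:
--     c = _canon(text)
--     if not c:
--         return None
--     cands = [(_canon(a), fam.upper())
--              for fam, arr in (header_aliases or {}).items() for a in (arr or [])]
--     best_len = max((len(p) for p, _ in cands if p and p in c), default=0)
--     if best_len == 0:
--         return None
--     return next(fam for p, fam in cands if len(p) == best_len and p in c)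
-- ===== Notes on version B (the rewrite author's own statement) =====
-- stated objective: alternative
-- what changed: A's nested loops carrying a running (best, best_len) state are replaced by building a flat candidate list with a comprehension, taking the max of matching canonical-alias lengths, and returning the first candidate realising that max.
import Mathlib
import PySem

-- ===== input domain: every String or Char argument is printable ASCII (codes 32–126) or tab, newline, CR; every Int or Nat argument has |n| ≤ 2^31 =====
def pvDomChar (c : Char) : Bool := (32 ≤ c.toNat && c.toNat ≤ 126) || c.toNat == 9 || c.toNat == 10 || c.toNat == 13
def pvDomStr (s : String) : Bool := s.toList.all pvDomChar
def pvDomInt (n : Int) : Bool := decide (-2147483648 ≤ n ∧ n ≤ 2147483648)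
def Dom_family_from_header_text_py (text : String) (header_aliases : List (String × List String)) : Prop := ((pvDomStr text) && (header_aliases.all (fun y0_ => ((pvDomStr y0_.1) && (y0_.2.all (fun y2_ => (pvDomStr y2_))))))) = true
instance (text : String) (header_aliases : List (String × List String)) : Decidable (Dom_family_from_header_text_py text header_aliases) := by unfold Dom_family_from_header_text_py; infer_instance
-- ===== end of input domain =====

-- B replaces A's nested loops carrying a running (best, best_len) state by a flat candidate
-- list, a max over the matching lengths, and a first-match scan (objective: alternative).

-- ===== PORT A =====
-- _canon(s): uppercase then keep alphanumeric characters (shared helper of both Pythons)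
def pvCanon (s : String) : List Char :=
  (PySem.Chars.upper s.toList).filter PySem.Chars.isalnum

def family_from_header_text_py (text : String) (header_aliases : List (String × List String)) : Option String :=
  let c := pvCanon text
  if c = [] then none
  else
    let res := header_aliases.foldl
      (fun (st : Option String × Nat) pr =>
        let famUp := PySem.Str.upper pr.1
        pr.2.foldl
          (fun (st : Option String × Nat) al =>
            let p := pvCanon al
            if p ≠ [] ∧ PySem.Chars.isIn p c = true ∧ st.2 < p.length then
              (some famUp, p.length)
            else st) st)
      ((none : Option String), 0)
    res.1

-- ===== PORT B =====
def family_from_header_text_py_alt (text : String) (header_aliases : List (String × List String)) : Option String :=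
  let c := pvCanon text
  if c = [] then none
  else
    let cands := header_aliases.flatMap
      (fun pr => pr.2.map (fun a => (pvCanon a, PySem.Str.upper pr.1)))
    let bestLen : Nat := ((cands.filter
        (fun q => decide (q.1 ≠ []) && PySem.Chars.isIn q.1 c)).map
        (fun q => q.1.length)).foldl max 0
    if bestLen = 0 then none
    else (cands.find? (fun q => (q.1.length == bestLen) && PySem.Chars.isIn q.1 c)).map Prod.snd

-- ===== PRECONDITION & SPEC =====
def Spec_family_from_header_text_py (text : String) (header_aliases : List (String × List String)) (out : Option String) : Prop := out = family_from_header_text_py_alt text header_aliases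
instance (text : String) (header_aliases : List (String × List String)) (out : Option String) : Decidable (Spec_family_from_header_text_py text header_aliases out) := by unfold Spec_family_from_header_text_py; infer_instance

-- ===== CLAIM (what is proved, stated in full; the proofs are below) =====
def Claim_equal_family_from_header_text_py : Prop := ∀ (text : String) (header_aliases : List (String × List String)), Dom_family_from_header_text_py text header_aliases → Spec_family_from_header_text_py text header_aliases (family_from_header_text_py text header_aliases)

-- ===== LEMMAS AND PROOFS =====

-- A's loop body on the flattened candidate list (q = (canonical alias, upper-cased family))
def pvStep (c : List Char) (st : Option String × Nat) (q : List Char × String) : Option String × Nat :=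
  if q.1 ≠ [] ∧ PySem.Chars.isIn q.1 c = true ∧ st.2 < q.1.length then (some q.2, q.1.length) else st

-- running maximum of matching candidate lengths, started at n
def pvMx (c : List Char) (n : Nat) (K : List (List Char × String)) : Nat :=
  K.foldl (fun m q => if q.1 ≠ [] ∧ PySem.Chars.isIn q.1 c = true ∧ m < q.1.length then q.1.length else m) n

lemma pvLe_mx (c : List Char) (K : List (List Char × String)) : ∀ n, n ≤ pvMx c n K := by
  induction K with
  | nil => intro n; simp [pvMx]
  | cons q K ih =>
    intro n
    simp only [pvMx, List.foldl_cons]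
    split_ifs with h
    · exact le_trans (le_of_lt h.2.2) (ih _)
    · exact ih n

-- A's nested fold equals the fold of pvStep over the flat candidate list
lemma pvFlat (c : List Char) (ha : List (String × List String)) (st : Option String × Nat) :
    ha.foldl
      (fun (st : Option String × Nat) pr =>
        let famUp := PySem.Str.upper pr.1
        pr.2.foldl
          (fun (st : Option String × Nat) al =>
            let p := pvCanon al
            if p ≠ [] ∧ PySem.Chars.isIn p c = true ∧ st.2 < p.length then
              (some famUp, p.length)
            else st) st) st
    = (ha.flatMap (fun pr => pr.2.map (fun a => (pvCanon a, PySem.Str.upper pr.1)))).foldl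
        (pvStep c) st := by
  rw [List.foldl_flatMap]
  simp only [List.foldl_map, pvStep]

-- pvMx started at n is B's foldl-max over the filtered, mapped candidate list
lemma pvMx_eq_filter (c : List Char) (K : List (List Char × String)) : ∀ n,
    pvMx c n K =
      ((K.filter (fun q => decide (q.1 ≠ []) && PySem.Chars.isIn q.1 c)).map
        (fun q => q.1.length)).foldl max n := by
  induction K with
  | nil => intro n; simp [pvMx]
  | cons q K ih =>
    intro n
    simp only [pvMx, List.foldl_cons, List.filter_cons]
    by_cases hP : q.1 ≠ [] ∧ PySem.Chars.isIn q.1 c = true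
    · have hb : (decide (q.1 ≠ []) && PySem.Chars.isIn q.1 c) = true := by
        simp [hP.1, hP.2]
      rw [hb]
      simp only [if_true, List.map_cons, List.foldl_cons]
      by_cases hlt : n < q.1.length
      · rw [if_pos ⟨hP.1, hP.2, hlt⟩]
        have : max n q.1.length = q.1.length := by omega
        rw [← pvMx, ih, this]
      · rw [if_neg (by tauto)]
        have : max n q.1.length = n := by omega
        rw [← pvMx, ih, this]
    · have hb : (decide (q.1 ≠ []) && PySem.Chars.isIn q.1 c) = false := by
        rcases not_and_or.mp hP with h | h
        · simp [show q.1 = [] by tauto]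
        · simp; intro _; exact (Bool.not_eq_true _).mp h
      rw [hb]
      simp only [Bool.false_eq_true, if_false]
      rw [if_neg (by tauto), ← pvMx, ih]

-- characterisation of A's fold: second component is the running max, first is the
-- family of the first candidate realising it (if the max moved at all)
lemma pvCore (c : List Char) (K : List (List Char × String)) : ∀ (b : Option String) (n : Nat),
    K.foldl (pvStep c) (b, n) =
      if pvMx c n K = n then (b, n)
      else ((K.find? (fun q => decide (q.1 ≠ []) && PySem.Chars.isIn q.1 c
              && (q.1.length == pvMx c n K))).map Prod.snd, pvMx c n K) := by
  induction K with
  | nil => intro b n; simp [pvMx]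
  | cons q K ih =>
    intro b n
    have hmx : pvMx c n (q :: K)
        = pvMx c (if q.1 ≠ [] ∧ PySem.Chars.isIn q.1 c = true ∧ n < q.1.length then q.1.length else n) K := by
      simp [pvMx]
    by_cases hc : q.1 ≠ [] ∧ PySem.Chars.isIn q.1 c = true ∧ n < q.1.length
    · -- the head updates the state
      have hM : pvMx c n (q :: K) = pvMx c q.1.length K := by rw [hmx, if_pos hc]
      have hle : q.1.length ≤ pvMx c q.1.length K := pvLe_mx c K _
      have hMn : pvMx c n (q :: K) ≠ n := by rw [hM]; omega
      rw [List.foldl_cons, pvStep, if_pos hc, ih, if_neg hMn, hM]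
      by_cases hEq : pvMx c q.1.length K = q.1.length
      · rw [if_pos hEq, List.find?_cons_of_pos]
        · simp [hEq]
        · simp [hc.1, hc.2.1, hEq]
      · rw [if_neg hEq, List.find?_cons_of_neg]
        simp only [Bool.and_eq_true, beq_iff_eq, decide_eq_true_eq, not_and]
        intro _ h; exact hEq h.symm
    · -- the head leaves the state unchanged
      have hM : pvMx c n (q :: K) = pvMx c n K := by rw [hmx, if_neg hc]
      rw [List.foldl_cons, pvStep, if_neg hc, ih, hM]
      by_cases hZ : pvMx c n K = n
      · rw [if_pos hZ, if_pos hZ]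
      · rw [if_neg hZ, if_neg hZ, List.find?_cons_of_neg]
        have hnM : n < pvMx c n K := lt_of_le_of_ne (pvLe_mx c K n) (Ne.symm hZ)
        simp only [Bool.and_eq_true, beq_iff_eq, decide_eq_true_eq, not_and]
        intro h1 h2
        exact absurd ⟨h1.1, h1.2, by omega⟩ hc
    
-- ===== VERDICT (by name: the statement is the Claim_ definition above) =====
theorem family_from_header_text_py_spec : Claim_equal_family_from_header_text_py := by
  intro text ha _
  unfold Spec_family_from_header_text_py family_from_header_text_py family_from_header_text_py_alt
  by_cases hc : pvCanon text = []
  · simp [hc]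
  · simp only [hc, if_false]
    rw [pvFlat (pvCanon text) ha, pvCore,
        ← pvMx_eq_filter (pvCanon text)
            (ha.flatMap (fun pr => pr.2.map (fun a => (pvCanon a, PySem.Str.upper pr.1)))) 0]
    by_cases hZ : pvMx (pvCanon text) 0
        (ha.flatMap (fun pr => pr.2.map (fun a => (pvCanon a, PySem.Str.upper pr.1)))) = 0
    · rw [if_pos hZ, if_pos hZ]
    · rw [if_neg hZ, if_neg hZ]
      have hpred : (fun (q : List Char × String) => decide (q.1 ≠ []) && PySem.Chars.isIn q.1 (pvCanon text)
              && (q.1.length == pvMx (pvCanon text) 0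
                  (ha.flatMap (fun pr => pr.2.map (fun a => (pvCanon a, PySem.Str.upper pr.1))))))
          = (fun q => (q.1.length == pvMx (pvCanon text) 0
                  (ha.flatMap (fun pr => pr.2.map (fun a => (pvCanon a, PySem.Str.upper pr.1))))) && PySem.Chars.isIn q.1 (pvCanon text)) := by
        funext q
        by_cases hL : q.1.length = pvMx (pvCanon text) 0
            (ha.flatMap (fun pr => pr.2.map (fun a => (pvCanon a, PySem.Str.upper pr.1))))
        · have hne : q.1 ≠ [] := by
            intro h; rw [h] at hL; simp at hL; omega
          simp [hL, hne, Bool.and_comm]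
        · have hb : (q.1.length == pvMx (pvCanon text) 0
              (ha.flatMap (fun pr => pr.2.map (fun a => (pvCanon a, PySem.Str.upper pr.1))))) = false := by
            simp [hL]
          rw [hb]; simp
      rw [hpred]
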